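-- pv_equiv track=rewrite | github.com/pp8817/Algorithm | 프로그래머스/3/42895. N으로 표현/N으로 표현.py | solution
-- ===== SOURCE A (Python) =====
-- def solution(N, number):
--     # s[i]: N을 i번 사용해서 만들 수 있는 수들의 집합
--     s = [set() for _ in range(8)] #range(8)인 이유: N을 8번보다 많이 사용하면 -1 리턴
--
--     for i, x in enumerate(s, start=1):
--         x.add(int(str(N)*i))
--
--     for i in range(len(s)): # N들을 i번 사용해서 만들 수 있는 숫자들을 구할 예정
--         for j in range(i): # i: 2인 경우, j: 0,1
--             for op1 in s[j]: # op1: 피연산자1, N을 j+1번 사용해서 만들 수 있는 숫자들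
--                 for op2 in s[i-j-1]: # op2: 피연산자2, N을 (i-j)번 사용해서 만들 수 있는 숫자들
--                     s[i].add(op1+op2)
--                     s[i].add(op1-op2)
--                     s[i].add(op1*op2)
--
--                     if op2 != 0 and (op1>=op2):
--                         s[i].add(op1//op2)
--         if number in s[i]: # 찾고자 하는 수 number가 s[i]에 존재한다면
--             answer = i+1
--             return answer
--
--     return -1
-- ===== SOURCE B (Python) =====
-- def solution(N, number):
--     # Memoized recursion: make(count) = set of values expressible using N exactly `count` times.
--     cache = {}
--
--     def make(count):
--         if count in cache:
--             return cache[count]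
--         vals = {int(str(N) * count)}
--         for j in range(1, count):
--             for op1 in make(j):
--                 for op2 in make(count - j):
--                     vals.add(op1 + op2)
--                     vals.add(op1 - op2)
--                     vals.add(op1 * op2)
--                     if op2 != 0 and op1 >= op2:
--                         vals.add(op1 // op2)
--         cache[count] = vals
--         return vals
--
--     for count in range(1, 9):
--         if number in make(count):
--             return count
--     return -1
-- ===== Notes on version B (the rewrite author's own statement) =====
-- stated objective: alternative
-- what changed: Replaces A's imperative 8-slot list of sets filled by an index-driven triple loop with a memoized recursive helper make(count) that builds the set of values using N exactly count times on demand; the top level just scans counts 1..8 for the first set containing number.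
import Mathlib
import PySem

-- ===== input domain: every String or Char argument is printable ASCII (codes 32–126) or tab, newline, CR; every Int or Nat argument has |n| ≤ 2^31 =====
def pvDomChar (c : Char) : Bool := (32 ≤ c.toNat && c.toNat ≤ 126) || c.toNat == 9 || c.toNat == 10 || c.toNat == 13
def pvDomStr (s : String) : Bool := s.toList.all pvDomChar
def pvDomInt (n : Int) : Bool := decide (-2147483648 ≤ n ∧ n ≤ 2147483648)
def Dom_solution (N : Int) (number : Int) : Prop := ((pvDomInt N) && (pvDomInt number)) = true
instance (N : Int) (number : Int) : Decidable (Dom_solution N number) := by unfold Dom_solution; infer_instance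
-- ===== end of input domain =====

-- B replaces A's imperative 8-slot list-of-sets triple loop by a memoized recursive
-- make(count) helper scanned at top level; alternative decomposition, same cost.


-- ===== PORT A =====
-- int(str(N)*i); the `.getD 0` default is unreachable under Pre_solution (0 ≤ N, i ≥ 1)
def pvSeed (N : Int) (i : Int) : Int :=
  (PySem.Int.ofChars? (PySem.List.pyRepeat (PySem.Int.toChars N) i)).getD 0

-- the four s[i].add(...) statements of the innermost loop body (shared: identical in A and B)
def pvCombine (acc : PySem.Set Int) (op1 op2 : Int) : PySem.Set Int :=
  let acc := ((acc.add (op1 + op2)).add (op1 - op2)).add (op1 * op2)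
  if op2 ≠ 0 ∧ op2 ≤ op1 then acc.add (PySem.Int.floordiv op1 op2) else acc

-- 'for op1 in xs: for op2 in ys: …' (result depends only on set membership, so list order is safe)
def pvCross (acc : PySem.Set Int) (xs ys : PySem.Set Int) : PySem.Set Int :=
  xs.foldl (fun a op1 => ys.foldl (fun a2 op2 => pvCombine a2 op1 op2) a) acc

-- body of 'for j in range(i): …' accumulating into s[i]
def pvStepA (s : List (PySem.Set Int)) (i : Nat) : PySem.Set Int :=
  (List.range i).foldl
    (fun acc j => pvCross acc (s.getD j PySem.Set.empty) (s.getD (i - j - 1) PySem.Set.empty))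
    (s.getD i PySem.Set.empty)

-- 'for i in range(len(s)): … if number in s[i]: return i+1' with early return, as recursion on i
def pvLoopA (number : Int) (s : List (PySem.Set Int)) (i : Nat) : Int :=
  if h : i < 8 then
    let t := pvStepA s i
    if number ∈ t then (i : Int) + 1
    else pvLoopA number (s.set i t) (i + 1)
  else -1
termination_by 8 - i

def solution (N : Int) (number : Int) : Int :=
  let s := (List.range 8).map (fun _ => (PySem.Set.empty : PySem.Set Int))
  let s := (PySem.List.enumerate s 1).map (fun p => PySem.Set.add p.2 (pvSeed N p.1))
  pvLoopA number s 0

-- ===== PORT B =====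
-- make(count): the set of values using N exactly `count` times (memoization is a cache only;
-- the recursion itself is ported)
def pvMake (N : Int) (count : Nat) : PySem.Set Int :=
  (List.range' 1 (count - 1)).attach.foldl
    (fun acc j => pvCross acc (pvMake N j.1) (pvMake N (count - j.1)))
    (PySem.Set.add PySem.Set.empty (pvSeed N (count : Int)))
termination_by count
decreasing_by
  · have := List.mem_range'.mp j.2; omega
  · have := List.mem_range'.mp j.2; omega

-- 'for count in range(1, 9): if number in make(count): return count' as recursion on count
def pvLoopB (N : Int) (number : Int) (c : Nat) : Int :=
  if c ≤ 8 then (if number ∈ pvMake N c then (c : Int) else pvLoopB N number (c + 1)) else -1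
termination_by 9 - c

def solution_alt (N : Int) (number : Int) : Int :=
  pvLoopB N number 1

-- ===== PRECONDITION & SPEC =====
-- Pre_ excludes exactly N < 0, on which A always raises ValueError: int(str(N)*2) parses e.g. "-3-3".
def Pre_solution (N : Int) (number : Int) : Prop := 0 ≤ N
instance (N : Int) (number : Int) : Decidable (Pre_solution N number) := by unfold Pre_solution; infer_instance
def pvWitness_solution : Int × Int := (2, 12)

def Spec_solution (N : Int) (number : Int) (out : Int) : Prop := out = solution_alt N number
instance (N : Int) (number : Int) (out : Int) : Decidable (Spec_solution N number out) := by unfold Spec_solution; infer_instance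

-- ===== CLAIM (what is proved, stated in full; the proofs are below) =====
def Claim_equal_solution : Prop := ∀ (N : Int) (number : Int), Dom_solution N number → Pre_solution N number → Spec_solution N number (solution N number)

-- ===== LEMMAS AND PROOFS =====

lemma pv_foldl_attach {α β : Type} (l : List α) (f : β → α → β) (b : β) :
    l.attach.foldl (fun acc x => f acc x.1) b = l.foldl f b := by
  induction l generalizing b with
  | nil => simp
  | cons a t ih => simp [List.attach_cons, List.foldl_map, ih]

-- loop invariant of A: slots below i hold the finished sets (= pvMake), slots at or above i still hold the seed
def pvInv (N : Int) (s : List (PySem.Set Int)) (i : Nat) : Prop :=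
  s.length = 8 ∧ ∀ j, j < 8 →
    s.getD j PySem.Set.empty =
      if j < i then pvMake N (j + 1) else PySem.Set.add PySem.Set.empty (pvSeed N ((j : Int) + 1))

lemma pvStepA_eq (N : Int) (s : List (PySem.Set Int)) (i : Nat)
    (hInv : pvInv N s i) (hi : i < 8) : pvStepA s i = pvMake N (i + 1) := by
  obtain ⟨hlen, hj⟩ := hInv
  rw [pvMake]
  rw [pv_foldl_attach (List.range' 1 (i + 1 - 1))
        (fun acc j => pvCross acc (pvMake N j) (pvMake N (i + 1 - j)))]
  rw [show (i + 1 - 1) = i from rfl, List.range'_eq_map_range, List.foldl_map]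
  unfold pvStepA
  have hbase : s.getD i PySem.Set.empty = PySem.Set.add PySem.Set.empty (pvSeed N ((i : Int) + 1)) := by
    have := hj i hi; simpa using this
  rw [hbase]
  apply PySem.List.foldl_congr_mem
  intro acc j hjm
  have hji : j < i := List.mem_range.mp hjm
  have h1 : s.getD j PySem.Set.empty = pvMake N (j + 1) := by
    have := hj j (by omega); simpa [hji] using this
  have h2 : s.getD (i - j - 1) PySem.Set.empty = pvMake N (i - j) := by
    have := hj (i - j - 1) (by omega)
    rw [if_pos (by omega)] at this
    rw [this, show (i - j - 1 + 1) = i - j from by omega]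
  rw [h1, h2, show (1 + j) = j + 1 from by omega, show (i + 1 - (j + 1)) = i - j from by omega]

lemma pvLoop_eq (N number : Int) : ∀ k i s, i + k = 8 → pvInv N s i →
    pvLoopA number s i = pvLoopB N number (i + 1) := by
  intro k
  induction k with
  | zero =>
    intro i s h _
    have hi : i = 8 := by omega
    subst hi
    rw [pvLoopA, pvLoopB]
    norm_num
  | succ k ih =>
    intro i s h hInv
    have hi : i < 8 := by omega
    have hstep := pvStepA_eq N s i hInv hi
    rw [pvLoopA, pvLoopB]
    rw [dif_pos hi, if_pos (by omega : i + 1 ≤ 8)]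
    by_cases hm : number ∈ pvMake N (i + 1)
    · rw [hstep, if_pos hm, if_pos hm]; push_cast; ring
    · rw [hstep, if_neg hm, if_neg hm]
      have hInv' : pvInv N (s.set i (pvMake N (i + 1))) (i + 1) := by
        obtain ⟨hlen, hj⟩ := hInv
        refine ⟨by simpa using hlen, ?_⟩
        intro j hj8
        by_cases hji : j = i
        · subst hji
          have : (s.set j (pvMake N (j + 1))).getD j PySem.Set.empty = pvMake N (j + 1) := by
            rw [List.getD_eq_getElem?_getD, List.getElem?_set_self (by omega)]
            simp
          rw [this, if_pos (by omega)]
        · have : (s.set i (pvMake N (i + 1))).getD j PySem.Set.empty = s.getD j PySem.Set.empty := by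
            rw [List.getD_eq_getElem?_getD, List.getElem?_set_ne (by omega), ← List.getD_eq_getElem?_getD]
          rw [this, hj j hj8]
          by_cases hlt : j < i
          · rw [if_pos hlt, if_pos (by omega)]
          · rw [if_neg hlt, if_neg (by omega)]
      exact ih (i + 1) (s.set i (pvMake N (i + 1))) (by omega) hInv'

lemma pvInit_inv (N : Int) :
    pvInv N ((PySem.List.enumerate ((List.range 8).map (fun _ => (PySem.Set.empty : PySem.Set Int))) 1).map
      (fun p => PySem.Set.add p.2 (pvSeed N p.1))) 0 := by
  constructor
  · simp [List.range_succ, PySem.List.enumerate]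
  · intro j hj8
    rw [if_neg (by omega)]
    interval_cases j <;>
      simp [List.range_succ, PySem.List.enumerate]

-- ===== VERDICT (by name: the statement is the Claim_ definition above) =====
theorem solution_spec : Claim_equal_solution := by
  intro N number _ _
  unfold Spec_solution solution solution_alt
  exact pvLoop_eq N number 8 0 _ rfl (pvInit_inv N)
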